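/-
  GENERATED by c/gen_globals.py from gif_GLOBALS.txt — do not edit; re-run the script when the image is rebuilt.

  The 8 globals registered with the sanitizer: the descriptor table at 0x141f00 (what `_sub_I_65535_1` passes to
  `__asan_register_globals`), `.init_array`, and the evaluated facts `ShadowOK.register` asks for.
-/
import Asan.Runtime
namespace Gif.Globals
open Asan

/-- The address of the descriptor table (`.data..LASAN0`): the constructor's `edi`. -/
def table : Nat := 0x141f00

/-- The number of descriptors: the constructor's `esi`. -/
def count : Nat := 8

/-- `InterlacedJumps`: 16 bytes at 0x141300, slot of 64 bytes (red zone [0x141310, 0x141340)); descriptor at 0x141f00. -/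
def InterlacedJumps : GlobalDesc := ⟨0x141300, 16, 64⟩

/-- `InterlacedOffset`: 16 bytes at 0x141340, slot of 64 bytes (red zone [0x141350, 0x141380)); descriptor at 0x141f40. -/
def InterlacedOffset : GlobalDesc := ⟨0x141340, 16, 64⟩

/-- `CodeMasks`: 26 bytes at 0x141380, slot of 64 bytes (red zone [0x14139a, 0x1413c0)); descriptor at 0x141f80. -/
def CodeMasks : GlobalDesc := ⟨0x141380, 26, 64⟩

/-- `errno`: 4 bytes at 0x142300, slot of 64 bytes (red zone [0x142304, 0x142340)); descriptor at 0x141fc0. -/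
def errno : GlobalDesc := ⟨0x142300, 4, 64⟩

/-- `*.LC7`: 7 bytes at 0x141240, slot of 64 bytes (red zone [0x141247, 0x141280)); descriptor at 0x142000. -/
def LC7 : GlobalDesc := ⟨0x141240, 7, 64⟩

/-- `*.LC9`: 7 bytes at 0x1412c0, slot of 64 bytes (red zone [0x1412c7, 0x141300)); descriptor at 0x142040. -/
def LC9 : GlobalDesc := ⟨0x1412c0, 7, 64⟩

/-- `*.LC8`: 7 bytes at 0x141280, slot of 64 bytes (red zone [0x141287, 0x1412c0)); descriptor at 0x142080. -/
def LC8 : GlobalDesc := ⟨0x141280, 7, 64⟩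

/-- `*.LC4`: 3 bytes at 0x141200, slot of 64 bytes (red zone [0x141203, 0x141240)); descriptor at 0x1420c0. -/
def LC4 : GlobalDesc := ⟨0x141200, 3, 64⟩

/-- The table, in table order. -/
def descs : List GlobalDesc := [InterlacedJumps, InterlacedOffset, CodeMasks, errno, LC7, LC9, LC8, LC4]

/-- `.init_array`: (address of the entry, its value). -/
def initArray : List (Nat × Nat) := [(0x141000, 0x10b300)]

/-- The table has `count` descriptors. -/
theorem descs_length : descs.length = count := by decide

/-- Every descriptor is sane: 8-aligned slot, a whole number of granules, containing the global, inside the image. -/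
theorem descs_ok : ∀ d, d ∈ descs → d.OK := by decide

/-- The slots are pairwise apart. -/
theorem descs_apart : descs.Pairwise GlobalDesc.Apart := by decide

/-- The objects `ShadowOK.register` adds for this table (reverse table order). -/
def objs : List Obj := (descs.map GlobalDesc.obj).reverse

/-- The runtime of this image, for the runtime symbols `S` (`Gif.Symbols.rt`). -/
def runtime (S : RtSymbols) : Runtime := ⟨S, table, descs⟩

end Gif.Globals
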